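-- pv_equiv track=rewrite | github.com/Challenge-Next-Level/Floyd-Warshall | LeeYooseok/Programmers/Programmers_코딩테스트_고득점kit/동적 계획법/N으로 표현.py | solution
-- ===== SOURCE A (Python) =====
-- def solution(N, number):
--
--     if N == number:
--         return 1
--
--     answer = -1
--     arr = [set() for _ in range(8)]
--
--     for i in range(len(arr)):
--         arr[i].add(int(str(N) * (i + 1)))
--
--     for i in range(1, 8):
--         for j in range(i):
--             for op1 in arr[j]:
--                 for op2 in arr[i - j - 1]:
--                     arr[i].add(op1 + op2)
--                     arr[i].add(op1 - op2)
--                     arr[i].add(op1 * op2)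
--                     if op2 != 0:
--                         arr[i].add(op1 // op2)
--         if number in arr[i]:
--             answer = i + 1
--             break
--
--     return answer
-- ===== SOURCE B (Python) =====
-- def solution(N, number):
--     if N == number:
--         return 1
--
--     def make(k):
--         # the set of all values buildable from exactly k copies of N
--         s = {int(str(N) * k)}
--         for i in range(1, k):
--             for a in make(i):
--                 for b in make(k - i):
--                     s.add(a + b)
--                     s.add(a - b)
--                     s.add(a * b)
--                     if b != 0:
--                         s.add(a // b)
--         return s
--
--     for k in range(2, 9):
--         if number in make(k):
--             return k
--     return -1
-- ===== Notes on version B (the rewrite author's own statement) =====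
-- stated objective: alternative
-- what changed: A's bottom-up dynamic-programming table arr[0..7] of sets filled by three nested index loops is replaced by a top-down recursion make(k) over the copy count (the set of values buildable from exactly k copies of N), scanned for the first k in 2..8 containing number after an early N==number exit.
import Mathlib
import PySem

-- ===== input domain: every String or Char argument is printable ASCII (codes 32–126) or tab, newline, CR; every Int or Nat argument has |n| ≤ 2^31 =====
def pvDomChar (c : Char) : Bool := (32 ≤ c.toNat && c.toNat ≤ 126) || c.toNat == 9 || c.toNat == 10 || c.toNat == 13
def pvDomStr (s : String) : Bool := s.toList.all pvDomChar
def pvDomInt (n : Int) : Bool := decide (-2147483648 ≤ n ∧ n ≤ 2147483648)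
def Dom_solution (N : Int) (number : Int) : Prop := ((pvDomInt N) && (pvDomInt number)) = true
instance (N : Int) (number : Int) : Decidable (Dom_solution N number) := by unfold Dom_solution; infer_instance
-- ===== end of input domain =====

-- B replaces A's bottom-up table of sets by a top-down recursion make(k) over the copy count;
-- same recurrence and set semantics, different decomposition (objective: alternative).

-- Python's `set` here is modelled by Std.HashSet: every set in both programs is only
-- built from other sets and tested for membership (never consumed in iteration order in a
-- way the result can see), so a hash set is exact — and evaluable, where a list-backed set
-- makes these ports quadratically slower.

-- ===== PORT A =====
-- int(str(N) * k): the decimal string of N repeated k times, parsed back.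
-- PySem.Int.ofChars? is none (Python: ValueError) exactly when N < 0 and 2 ≤ k —
-- those inputs are outside Pre_solution; .getD 0 only makes the port total there.
def aConcat (N : Int) (k : Nat) : Int :=
  (PySem.Int.ofChars? ((List.replicate k (PySem.Int.toChars N)).flatten)).getD 0

-- the four arr[i].add(...) statements of A's innermost loop body
def aAdd4 (s : Std.HashSet Int) (op1 op2 : Int) : Std.HashSet Int :=
  let s := s.insert (op1 + op2)
  let s := s.insert (op1 - op2)
  let s := s.insert (op1 * op2)
  if op2 ≠ 0 then s.insert (PySem.Int.floordiv op1 op2) else s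

-- "for op1 in arr[j]: for op2 in arr[i-j-1]: ..." accumulating into arr[i]
def aCombine (s s1 s2 : Std.HashSet Int) : Std.HashSet Int :=
  s1.fold (fun s op1 => s2.fold (fun s op2 => aAdd4 s op1 op2) s) s

-- the body of "for j in range(i): ..." building arr[i]
def aStep (arr : List (Std.HashSet Int)) (i : Nat) : Std.HashSet Int :=
  (List.range i).foldl
    (fun s j => aCombine s (arr.getD j ∅) (arr.getD (i - j - 1) ∅))
    (arr.getD i ∅)

-- "for i in range(1, 8): ... if number in arr[i]: answer = i + 1; break"
def aLoop (number : Int) : List Nat → List (Std.HashSet Int) → Int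
  | [], _ => -1
  | i :: rest, arr =>
    let si := aStep arr i
    if si.contains number then (i : Int) + 1 else aLoop number rest (arr.set i si)

def solution (N : Int) (number : Int) : Int :=
  if N = number then 1
  else
    let arr : List (Std.HashSet Int) := (List.range 8).map (fun _ => (∅ : Std.HashSet Int))
    let arr := (List.range 8).foldl
      (fun a i => a.set i ((a.getD i ∅).insert (aConcat N (i + 1)))) arr
    aLoop number (List.range' 1 7) arr

-- ===== PORT B =====
-- int(str(N) * k), identical expression in Source B
def bConcat (N : Int) (k : Nat) : Int :=
  (PySem.Int.ofChars? ((List.replicate k (PySem.Int.toChars N)).flatten)).getD 0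

-- the four s.add(...) statements of make's innermost loop
def bAdd4 (s : Std.HashSet Int) (a b : Int) : Std.HashSet Int :=
  let s := s.insert (a + b)
  let s := s.insert (a - b)
  let s := s.insert (a * b)
  if b ≠ 0 then s.insert (PySem.Int.floordiv a b) else s

-- "for a in make(i): for b in make(k-i): ..."
def bCombine (s sa sb : Std.HashSet Int) : Std.HashSet Int :=
  sa.fold (fun s a => sb.fold (fun s b => bAdd4 s a b) s) s

-- make(k): the set of all values buildable from exactly k copies of N
-- (.attach carries the termination proof i ∈ range' 1 (k-1), so i < k and k - i < k)
def bMake (N : Int) (k : Nat) : Std.HashSet Int :=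
  (List.range' 1 (k - 1)).attach.foldl
    (fun s i => bCombine s (bMake N i.1) (bMake N (k - i.1)))
    ((∅ : Std.HashSet Int).insert (bConcat N k))
decreasing_by
  · have h := List.mem_range'_1.mp i.2; omega
  · have h := List.mem_range'_1.mp i.2; omega

-- "for k in range(2, 9): if number in make(k): return k"
def bScan (N number : Int) : List Nat → Int
  | [] => -1
  | k :: rest => if (bMake N k).contains number then (k : Int) else bScan N number rest

def solution_alt (N : Int) (number : Int) : Int :=
  if N = number then 1
  else bScan N number (List.range' 2 7)

-- ===== PRECONDITION & SPEC =====
-- Pre_ excludes N < 0 with N ≠ number: there Python A raises ValueError at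
-- int(str(N) * k) for k ≥ 2 (e.g. int("-3-3")); B raises at the same place.
def Pre_solution (N : Int) (number : Int) : Prop := 0 ≤ N ∨ N = number
instance (N : Int) (number : Int) : Decidable (Pre_solution N number) := by
  unfold Pre_solution; infer_instance

def pvWitness_solution : Int × Int := (5, 12)

def Spec_solution (N : Int) (number : Int) (out : Int) : Prop := out = solution_alt N number
instance (N : Int) (number : Int) (out : Int) : Decidable (Spec_solution N number out) := by
  unfold Spec_solution; infer_instance

-- ===== CLAIM (what is proved, stated in full; the proofs are below) =====
def Claim_equal_solution : Prop := ∀ (N : Int) (number : Int), Dom_solution N number → Pre_solution N number → Spec_solution N number (solution N number)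

-- ===== LEMMAS AND PROOFS =====

-- unfolding of bMake without the .attach bookkeeping
theorem bMake_eq (N : Int) (k : Nat) :
    bMake N k = (List.range' 1 (k - 1)).foldl
      (fun s i => bCombine s (bMake N i) (bMake N (k - i)))
      ((∅ : Std.HashSet Int).insert (bConcat N k)) := by
  rw [bMake]
  exact List.foldl_attach (f := fun s i => bCombine s (bMake N i) (bMake N (k - i)))
    (b := (∅ : Std.HashSet Int).insert (bConcat N k))

theorem mk1 (N : Int) : bMake N 1 = (∅ : Std.HashSet Int).insert (aConcat N 1) := by
  rw [bMake_eq]; rfl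

-- A's array after t of the outer steps are done: entries below t hold make(j+1),
-- the rest still hold the initial singleton {int(str(N)*(j+1))}
def pvArr (N : Int) (t : Nat) : List (Std.HashSet Int) :=
  (List.range 8).map (fun j =>
    if j = 0 then (∅ : Std.HashSet Int).insert (aConcat N 1)
    else if j < t then bMake N (j + 1) else (∅ : Std.HashSet Int).insert (aConcat N (j + 1)))

theorem pvArr_getD (N : Int) (t j : Nat) (h : j < 8) :
    (pvArr N t).getD j ∅ =
      (if j = 0 then (∅ : Std.HashSet Int).insert (aConcat N 1)
       else if j < t then bMake N (j + 1) else (∅ : Std.HashSet Int).insert (aConcat N (j + 1))) := by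
  simp [pvArr, List.getD_eq_getElem?_getD, h]

theorem pvArr_set (N : Int) (t : Nat) (h1 : 1 ≤ t) :
    (pvArr N t).set t (bMake N (t + 1)) = pvArr N (t + 1) := by
  apply List.ext_getElem
  · simp [pvArr]
  · intro j hj hj'
    have h8 : j < 8 := by simpa [pvArr] using hj'
    simp only [List.getElem_set, pvArr, List.getElem_map, List.getElem_range]
    by_cases hjt : t = j
    · subst hjt
      rw [if_pos rfl, if_neg (by omega), if_pos (by omega)]
    · rw [if_neg hjt]
      by_cases hj0 : j = 0
      · rw [if_pos hj0, if_pos hj0]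
      · rw [if_neg hj0, if_neg hj0]
        by_cases hlt : j < t
        · rw [if_pos hlt, if_pos (by omega)]
        · rw [if_neg hlt, if_neg (by omega)]

theorem aStep_eq (N : Int) (t : Nat) (h1 : 1 ≤ t) (h7 : t ≤ 7) :
    aStep (pvArr N t) t = bMake N (t + 1) := by
  rw [bMake_eq, Nat.add_sub_cancel, List.range'_eq_map_range, List.foldl_map]
  unfold aStep
  have hb : (pvArr N t).getD t ∅ = (∅ : Std.HashSet Int).insert (bConcat N (t + 1)) := by
    rw [pvArr_getD N t t (by omega), if_neg (by omega), if_neg (by omega)]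
    rfl
  rw [hb]
  apply PySem.List.foldl_congr_mem
  intro s j hj
  have hjt : j < t := List.mem_range.mp hj
  have e1 : bMake N (1 + j) = bMake N (j + 1) := by rw [Nat.add_comm]
  have e2 : bMake N (t + 1 - (1 + j)) = bMake N ((t - j - 1) + 1) := by congr 1; omega
  rw [e1, e2, pvArr_getD N t j (by omega), pvArr_getD N t (t - j - 1) (by omega)]
  by_cases hj0 : j = 0
  · subst hj0
    rw [if_pos rfl, ← mk1]
    by_cases hk0 : t - 0 - 1 = 0
    · rw [if_pos hk0, hk0]; rfl
    · rw [if_neg hk0, if_pos (by omega)]; rfl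
  · rw [if_neg hj0, if_pos hjt]
    by_cases hk0 : t - j - 1 = 0
    · rw [if_pos hk0, hk0, ← mk1]; rfl
    · rw [if_neg hk0, if_pos (by omega)]; rfl


theorem loop_scan (N number : Int) : ∀ n t : Nat, t + n = 8 → 1 ≤ t →
    aLoop number (List.range' t n) (pvArr N t) = bScan N number (List.range' (t + 1) n) := by
  intro n
  induction n with
  | zero => intro t _ _; rfl
  | succ m ih =>
    intro t h8 h1
    rw [List.range'_succ, List.range'_succ]
    simp only [aLoop, bScan]
    rw [aStep_eq N t h1 (by omega), pvArr_set N t h1]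
    by_cases hmem : (bMake N (t + 1)).contains number = true
    · rw [if_pos hmem, if_pos hmem]; push_cast; ring
    · rw [if_neg hmem, if_neg hmem]
      exact ih (t + 1) (by omega) (by omega)

-- ===== VERDICT (by name: the statement is the Claim_ definition above) =====
theorem solution_spec : Claim_equal_solution := by
  unfold Claim_equal_solution
  intro N number _ _
  unfold Spec_solution
  by_cases h : N = number
  · simp [solution, solution_alt, h]
  · have hA : solution N number = aLoop number (List.range' 1 7) (pvArr N 1) := by
      simp only [solution]; rw [if_neg h]; rfl
    have hB : solution_alt N number = bScan N number (List.range' 2 7) := by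
      simp only [solution_alt]; rw [if_neg h]
    rw [hA, hB]
    exact loop_scan N number 7 1 rfl (by omega)
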